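-- pv_equiv track=rewrite | github.com/kpi-keoa/kpi-python-course | Lab_Rab_0/Lab_Rab_0/Lab_Rab_0/Lab_Rab_0.py | Rotor_in
-- ===== SOURCE A (Python) =====
-- def Rotor_in(Index_key,Index_cod):
--     result_list = [
--         value
--         for _ in range(len(Index_cod))
--         for value in Index_key
--         ]
--     result=[
--         x-y
--         for x, y in zip(Index_cod, result_list)
--         ]
--
--     return result
-- ===== SOURCE B (Python) =====
-- def Rotor_in(Index_key, Index_cod):
--     if not Index_key:
--         return []
--     k = len(Index_key)
--     out = []
--     for start in range(0, len(Index_cod), k):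
--         block = Index_cod[start:start + k]
--         out.extend(x - y for x, y in zip(block, Index_key))
--     return out
-- ===== Notes on version B (the rewrite author's own statement) =====
-- stated objective: faster
-- what changed: A materializes the key repeated once per cod element (len(cod)*len(key) values) and zips; B walks Index_cod in blocks of len(Index_key), zipping each block with the key directly, never building the repeated list.
import Mathlib
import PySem

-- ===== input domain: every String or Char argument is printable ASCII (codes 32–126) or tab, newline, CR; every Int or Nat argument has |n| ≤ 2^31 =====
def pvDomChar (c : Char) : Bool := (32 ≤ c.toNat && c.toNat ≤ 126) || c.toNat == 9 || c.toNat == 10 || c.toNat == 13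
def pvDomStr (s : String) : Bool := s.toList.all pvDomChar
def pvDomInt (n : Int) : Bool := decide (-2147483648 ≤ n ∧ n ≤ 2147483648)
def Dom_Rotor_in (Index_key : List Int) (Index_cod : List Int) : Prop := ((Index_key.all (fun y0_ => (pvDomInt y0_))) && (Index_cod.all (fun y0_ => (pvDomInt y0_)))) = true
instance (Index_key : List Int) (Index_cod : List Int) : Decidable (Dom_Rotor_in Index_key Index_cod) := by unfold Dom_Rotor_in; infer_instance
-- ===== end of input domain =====

-- B avoids materializing the key repeated len(cod) times: it walks Index_cod in
-- blocks of len(Index_key), zipping each block with the key directly.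
-- ===== PORT A =====
def Rotor_in (Index_key : List Int) (Index_cod : List Int) : List Int :=
  let result_list := (List.range Index_cod.length).flatMap (fun _ => Index_key)
  (Index_cod.zip result_list).map (fun p => p.1 - p.2)

-- ===== PORT B =====
-- the 'for start in range(0, len(cod), k)' loop: each step takes the next block of k
-- elements (the slice cod[start:start+k]) and appends its zip with the key
def rotorChunks (k : Nat) (Index_key : List Int) (Index_cod : List Int) : List Int :=
  if _ : Index_cod = [] ∨ k = 0 then []
  else
    (List.zipWith (fun x y => x - y) (Index_cod.take k) Index_key)
      ++ rotorChunks k Index_key (Index_cod.drop k)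
termination_by Index_cod.length
decreasing_by
  rename_i h
  simp only [not_or] at h
  cases Index_cod with
  | nil => exact absurd rfl h.1
  | cons a t => simp [List.length_drop]; omega

def Rotor_in_alt (Index_key : List Int) (Index_cod : List Int) : List Int :=
  if Index_key = [] then [] else rotorChunks Index_key.length Index_key Index_cod

-- ===== PRECONDITION & SPEC =====
def Spec_Rotor_in (Index_key : List Int) (Index_cod : List Int) (out : List Int) : Prop := out = Rotor_in_alt Index_key Index_cod
instance (Index_key : List Int) (Index_cod : List Int) (out : List Int) : Decidable (Spec_Rotor_in Index_key Index_cod out) := by unfold Spec_Rotor_in; infer_instance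

-- ===== CLAIM (what is proved, stated in full; the proofs are below) =====
def Claim_equal_Rotor_in : Prop := ∀ (Index_key : List Int) (Index_cod : List Int), Dom_Rotor_in Index_key Index_cod → Spec_Rotor_in Index_key Index_cod (Rotor_in Index_key Index_cod)

-- ===== LEMMAS AND PROOFS =====

-- ===== VERDICT (by name: the statement is the Claim_ definition above) =====

lemma zipWith_append_trunc (f : Int → Int → Int) :
    ∀ (key cod rest : List Int),
      List.zipWith f cod (key ++ rest) =
        List.zipWith f (cod.take key.length) key ++ List.zipWith f (cod.drop key.length) rest := by
  intro key
  induction key with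
  | nil => intro cod rest; simp
  | cons y ys ih =>
    intro cod rest
    cases cod with
    | nil => simp
    | cons x xs => simp [ih xs rest]

lemma flatMap_range_const (key : List Int) (n : Nat) :
    (List.range n).flatMap (fun _ => key) = (List.replicate n key).flatten := by
  induction n with
  | zero => simp
  | succ m ih => rw [List.range_succ, List.replicate_succ']; simp [ih]

lemma chunks_eq (key : List Int) (hk : key ≠ []) :
    ∀ (n : Nat) (cod : List Int), cod.length ≤ n * key.length →
      List.zipWith (fun x y => x - y) cod (List.replicate n key).flatten =
        rotorChunks key.length key cod := by
  intro n
  induction n with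
  | zero =>
    intro cod hlen
    have : cod = [] := List.eq_nil_of_length_eq_zero (by omega)
    subst this
    rw [rotorChunks]; simp
  | succ m ih =>
    intro cod hlen
    rcases eq_or_ne cod [] with hc | hc
    · subst hc; rw [rotorChunks]; simp
    · rw [rotorChunks]
      have hk' : key.length ≠ 0 := by simpa using hk
      rw [dif_neg (by simp [hc, hk'])]
      rw [List.replicate_succ, List.flatten_cons, zipWith_append_trunc]
      congr 1
      apply ih
      simp [List.length_drop]
      have : cod.length ≤ (m + 1) * key.length := hlen
      nlinarith [this]

theorem Rotor_in_spec : Claim_equal_Rotor_in := by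
  intro key cod _
  unfold Spec_Rotor_in Rotor_in Rotor_in_alt
  rcases eq_or_ne key [] with hk | hk
  · subst hk; simp
  · rw [if_neg hk]
    have hzip : ∀ (l r : List Int),
        (l.zip r).map (fun p => p.1 - p.2) = List.zipWith (fun x y => x - y) l r := by
      intro l r; rw [List.zip, List.map_zipWith]
    simp only [flatMap_range_const]
    rw [hzip]
    apply chunks_eq key hk cod.length
    have : 1 ≤ key.length := List.length_pos_iff.mpr hk
    nlinarith [this]
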